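-- pv_equiv track=rewrite | github.com/h3x89/hackerrank | codesignal/93.2.2.py | solution
-- ===== SOURCE A (Python) =====
-- def solution(sentence):
--     result = []
--     for word in sentence.split():
--         if len(word) % 2 == 1:  # only process odd-length words
--             # Create frequency map (case insensitive)
--             char_freq = {}
--             word_lower = word.lower()
--             for char in word_lower:
--                 char_freq[char] = char_freq.get(char, 0) + 1
--
--             # Find the most frequent character
--             max_freq = 0
--             first_max_char = None
--             for char in word_lower:  # iterate in order to handle ties
--                 if char_freq[char] > max_freq:
--                     max_freq = char_freq[char]
--                     first_max_char = char
--
--             result.append(first_max_char)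
--
--     return ''.join(result)
-- ===== SOURCE B (Python) =====
-- def solution(sentence):
--     def best(w):
--         # (first char with maximal multiplicity in w, that multiplicity), or None if w is empty:
--         # strip out all copies of the leading char, recurse on the remainder, keep the better of the two
--         if not w:
--             return None
--         c = w[0]
--         rest = [x for x in w if x != c]
--         k = len(w) - len(rest)
--         b = best(rest)
--         return (c, k) if b is None or b[1] <= k else b
--
--     out = []
--     for word in sentence.split():
--         if len(word) % 2 == 1:
--             b = best(list(word.lower()))
--             if b is not None:
--                 out.append(b[0])
--     return ''.join(out)
-- ===== Notes on version B (the rewrite author's own statement) =====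
-- stated objective: alternative
-- what changed: Replaced A's per-word frequency dict plus ordered max-scan with a partition recursion: strip all copies of the leading character, count them by the length drop, recurse on the remainder, and keep the better (count, with ties to the leading char, whose first occurrence is earlier) of the two.
import Mathlib
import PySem

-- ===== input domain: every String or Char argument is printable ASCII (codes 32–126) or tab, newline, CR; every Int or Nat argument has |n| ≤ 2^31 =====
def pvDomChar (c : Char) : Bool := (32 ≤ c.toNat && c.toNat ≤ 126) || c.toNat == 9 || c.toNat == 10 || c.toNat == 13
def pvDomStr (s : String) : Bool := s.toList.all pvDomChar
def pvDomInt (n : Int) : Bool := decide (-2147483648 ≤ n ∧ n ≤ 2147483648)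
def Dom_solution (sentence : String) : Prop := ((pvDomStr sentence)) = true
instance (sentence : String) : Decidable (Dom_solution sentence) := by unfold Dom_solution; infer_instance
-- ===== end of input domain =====

-- B replaces A's per-word frequency dict + ordered max-scan by a partition recursion:
-- remove all copies of the leading char (counting them by the length drop), recurse on the
-- remainder, keep the better candidate (ties to the leading char); objective: alternative.


-- ===== PORT A =====
-- loop body of A's 'for word in sentence.split()' (named so the proofs can speak about it)
def pvStepA (result : List Char) (word : String) : List Char :=
  if PySem.Str.len word % 2 == 1 then
    let wordLower := (PySem.Str.lower word).toList
    let charFreq := wordLower.foldl (fun d c => d.insert c (d.getD c 0 + 1))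
      (PySem.Dict.empty : PySem.Dict Char Int)
    let fin := wordLower.foldl
      (fun (p : Int × Option Char) c =>
        if charFreq.getD c 0 > p.1 then (charFreq.getD c 0, some c) else p)
      ((0 : Int), (none : Option Char))
    -- Python appends first_max_char; it is never None here (an odd-length word is nonempty),
    -- so the none branch below is unreachable
    match fin.2 with
    | some c => result ++ [c]
    | none => result
  else result

def solution (sentence : String) : String :=
  String.ofList ((PySem.Str.split₀ sentence).foldl pvStepA [])

-- ===== PORT B =====
-- best(w): (first char with maximal multiplicity, that multiplicity), or none for empty w
def pvBest : List Char → Option (Char × Int)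
  | [] => none
  | c :: t =>
    let rest := (c :: t).filter (fun x => x != c)
    let k : Int := ((c :: t).length : Int) - (rest.length : Int)
    match pvBest rest with
    | none => some (c, k)
    | some b => if b.2 ≤ k then some (c, k) else some b
termination_by w => w.length
decreasing_by
  simp only [List.filter_cons, bne_self_eq_false, List.length_cons]
  exact Nat.lt_succ_of_le (List.length_filter_le _ _)

def solution_alt (sentence : String) : String :=
  String.ofList ((PySem.Str.split₀ sentence).foldl
    (fun out word =>
      if PySem.Str.len word % 2 == 1 then
        match pvBest (PySem.Str.lower word).toList with
        | some b => out ++ [b.1]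
        | none => out
      else out) [])

-- ===== PRECONDITION & SPEC =====
def Spec_solution (sentence : String) (out : String) : Prop := out = solution_alt sentence
instance (sentence : String) (out : String) : Decidable (Spec_solution sentence out) := by unfold Spec_solution; infer_instance

-- ===== CLAIM (what is proved, stated in full; the proofs are below) =====
def Claim_equal_solution : Prop := ∀ (sentence : String), Dom_solution sentence → Spec_solution sentence (solution sentence)

-- ===== LEMMAS AND PROOFS =====

-- "c is the FIRST character of wl attaining the maximal multiplicity"
def pvGood (wl : List Char) (c : Char) : Prop :=
  c ∈ wl ∧ (∀ d ∈ wl, wl.count d ≤ wl.count c) ∧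
    (∀ d ∈ wl, wl.count d = wl.count c → wl.idxOf c ≤ wl.idxOf d)

theorem pvGood_unique {wl : List Char} {a b : Char}
    (ha : pvGood wl a) (hb : pvGood wl b) : a = b := by
  obtain ⟨hma, hlea, htia⟩ := ha
  obtain ⟨hmb, hleb, htib⟩ := hb
  have hcount : wl.count a = wl.count b :=
    le_antisymm (hleb a hma) (hlea b hmb)
  have hidx : wl.idxOf a = wl.idxOf b :=
    le_antisymm (htia b hmb hcount.symm) (htib a hma hcount)
  have hla := List.idxOf_lt_length_of_mem hma
  have hlb := List.idxOf_lt_length_of_mem hmb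
  have h1 : wl[wl.idxOf a]? = some a :=
    List.getElem?_eq_getElem hla ▸ congrArg some (List.getElem_idxOf hla)
  have h2 : wl[wl.idxOf b]? = some b :=
    List.getElem?_eq_getElem hlb ▸ congrArg some (List.getElem_idxOf hlb)
  rw [hidx, h2] at h1
  exact (Option.some_inj.1 h1).symm

-- ===== A-side: A's scan is max?, and max? returns a pvGood character =====

theorem pv_scan_aux (key : Char → Int) (t : List Char) (m : Char) :
    (t.foldl (fun (p : Int × Option Char) c =>
        if p.1 < key c then (key c, some c) else p) (key m, some m)).2
    = PySem.List.max? (m :: t) key := by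
  induction t generalizing m with
  | nil => simp [PySem.List.max?]
  | cons c t ih =>
    simp only [PySem.List.max?, List.foldl_cons] at ih ⊢
    by_cases h : key m < key c
    · simp only [if_pos h]; exact ih c
    · simp only [if_neg h]; exact ih m

theorem pv_scan_eq_max? (key : Char → Int) (wl : List Char)
    (hk : ∀ c ∈ wl, 0 < key c) :
    (wl.foldl (fun (p : Int × Option Char) c =>
        if p.1 < key c then (key c, some c) else p) ((0 : Int), (none : Option Char))).2
    = PySem.List.max? wl key := by
  cases wl with
  | nil => rfl
  | cons x t =>
    have h0 : (0 : Int) < key x := hk x List.mem_cons_self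
    rw [List.foldl_cons, if_pos h0]
    exact pv_scan_aux key t x

-- max? of a cons: the head preferred (with ties) against max? of the tail
theorem pv_max?_cons (key : Char → Int) (t : List Char) : ∀ (x : Char),
    PySem.List.max? (x :: t) key
    = match PySem.List.max? t key with
      | none => some x
      | some m => if key x < key m then some m else some x := by
  induction t with
  | nil => intro x; simp [PySem.List.max?]
  | cons y t ih =>
    intro x
    have hz : PySem.List.max? (x :: y :: t) key
        = PySem.List.max? ((if key x < key y then y else x) :: t) key := by
      by_cases h : key x < key y <;>
        simp only [PySem.List.max?, List.foldl_cons, h, if_true, if_false]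
    rw [hz]
    by_cases h1 : key x < key y
    · rw [if_pos h1, ih y]
      cases hm : PySem.List.max? t key with
      | none => simp [h1]
      | some m =>
        by_cases h2 : key y < key m <;> by_cases h3 : key x < key m <;>
          (simp [h1, h2, h3]) <;> (exfalso; omega)
    · rw [if_neg h1, ih x, ih y]
      cases hm : PySem.List.max? t key with
      | none => simp [h1]
      | some m =>
        by_cases h2 : key y < key m <;> by_cases h3 : key x < key m <;>
          (simp [h1, h2, h3]) <;> (exfalso; omega)

-- max? returns the FIRST element attaining the maximal key
theorem pv_max?_first (key : Char → Int) :
    ∀ (xs : List Char) (m : Char), PySem.List.max? xs key = some m →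
      ∀ d ∈ xs, key d = key m → xs.idxOf m ≤ xs.idxOf d := by
  intro xs
  induction xs with
  | nil => intro m h; simp [PySem.List.max?] at h
  | cons x t ih =>
    intro m h d hd hk
    rw [pv_max?_cons] at h
    cases hm : PySem.List.max? t key with
    | none => rw [hm] at h; simp at h; subst h; simp
    | some m' =>
      rw [hm] at h
      have h' : (if key x < key m' then some m' else some x) = some m := h
      by_cases hlt : key x < key m'
      · rw [if_pos hlt] at h'
        have hmm : m = m' := by simpa using h'.symm
        subst hmm
        have hmx : m ≠ x := by intro he; rw [he] at hlt; omega
        rcases List.mem_cons.1 hd with hdx | hdt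
        · subst hdx; rw [hk] at hlt; omega
        · have hdx : d ≠ x := fun he => by rw [he] at hk; rw [hk] at hlt; omega
          have e1 : (x :: t).idxOf m = t.idxOf m + 1 := by simp [Ne.symm hmx]
          have e2 : (x :: t).idxOf d = t.idxOf d + 1 := by simp [Ne.symm hdx]
          have := ih m hm d hdt hk
          omega
      · rw [if_neg hlt] at h'
        have hmm : m = x := by simpa using h'.symm
        subst hmm
        simp

theorem pv_max?_good (wl : List Char) (m : Char)
    (h : PySem.List.max? wl (fun c => (wl.count c : Int)) = some m) : pvGood wl m := by
  refine ⟨PySem.List.max?_mem h, ?_, ?_⟩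
  · intro d hd
    exact_mod_cast PySem.List.max?_isMax h d hd
  · intro d hd hc
    exact pv_max?_first _ wl m h d hd (by exact_mod_cast hc)

-- ===== B-side: pvBest computes the count and a pvGood character =====

-- relative order of first occurrences is preserved by filtering
theorem pv_idxOf_filter_le (p : Char → Bool) : ∀ (l : List Char) (a b : Char),
    a ∈ l.filter p → b ∈ l.filter p →
    (l.filter p).idxOf a ≤ (l.filter p).idxOf b → l.idxOf a ≤ l.idxOf b := by
  intro l
  induction l with
  | nil => intro a b ha _ _; simp at ha
  | cons h t ih =>
    intro a b ha hb hle
    by_cases hha : h = a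
    · subst hha; simp
    · by_cases hhb : h = b
      · subst hhb
        have hpb : p h = true := (List.mem_filter.1 hb).2
        rw [List.filter_cons_of_pos hpb] at ha hle
        have e1 : (h :: t.filter p).idxOf a = (t.filter p).idxOf a + 1 := by
          simp [hha]
        have e2 : (h :: t.filter p).idxOf h = 0 := by simp
        omega
      · have ha' : a ∈ t.filter p := by
          by_cases hp : p h = true
          · rw [List.filter_cons_of_pos hp] at ha
            rcases List.mem_cons.1 ha with h1 | h1
            · exact absurd h1.symm hha
            · exact h1
          · rwa [List.filter_cons_of_neg (by simpa using hp)] at ha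
        have hb' : b ∈ t.filter p := by
          by_cases hp : p h = true
          · rw [List.filter_cons_of_pos hp] at hb
            rcases List.mem_cons.1 hb with h1 | h1
            · exact absurd h1.symm hhb
            · exact h1
          · rwa [List.filter_cons_of_neg (by simpa using hp)] at hb
        have hlt : (t.filter p).idxOf a ≤ (t.filter p).idxOf b := by
          by_cases hp : p h = true
          · rw [List.filter_cons_of_pos hp] at hle
            have e1 : (h :: t.filter p).idxOf a = (t.filter p).idxOf a + 1 := by
              simp [hha]
            have e2 : (h :: t.filter p).idxOf b = (t.filter p).idxOf b + 1 := by
              simp [hhb]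
            omega
          · rwa [List.filter_cons_of_neg (by simpa using hp)] at hle
        have := ih a b ha' hb' hlt
        have e1 : (h :: t).idxOf a = t.idxOf a + 1 := by simp [hha]
        have e2 : (h :: t).idxOf b = t.idxOf b + 1 := by simp [hhb]
        omega

theorem pv_count_filter_ne (c : Char) (l : List Char) {d : Char} (hd : d ≠ c) :
    (l.filter (fun x => x != c)).count d = l.count d := by
  rw [List.count_filter (by simpa using hd)]

-- stripping every copy of c drops the length by exactly count c
theorem pv_len_split (c : Char) (l : List Char) :
    l.length = l.count c + (l.filter (fun x => x != c)).length := by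
  rw [List.count_eq_countP, ← List.countP_eq_length_filter]
  have h0 := List.length_eq_countP_add_countP (p := fun x => x == c) (l := l)
  have h2 : List.countP (fun a => decide (¬(a == c) = true)) l
      = List.countP (fun x => x != c) l := by
    apply List.countP_congr
    intro x _
    cases hx : x == c <;> simp [bne, hx]
  omega

theorem pv_mem_rest {c d : Char} {t : List Char} (hd : d ∈ c :: t) (hne : d ≠ c) :
    d ∈ (c :: t).filter (fun x => x != c) := by
  rw [List.mem_filter]
  exact ⟨hd, by simpa using hne⟩

theorem pvBest_none (wl : List Char) : pvBest wl = none ↔ wl = [] := by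
  cases wl with
  | nil => simp [pvBest]
  | cons c t =>
    constructor
    · intro h
      rw [pvBest] at h
      cases hb : pvBest ((c :: t).filter (fun x => x != c)) with
      | none => rw [hb] at h; simp at h
      | some b => rw [hb] at h; split at h <;> (try split at h) <;> simp at h
    · intro h; exact absurd h (by simp)

theorem pvBest_good : ∀ (wl : List Char) (e : Char) (m : Int),
    pvBest wl = some (e, m) → m = wl.count e ∧ pvGood wl e := by
  intro wl
  induction wl using pvBest.induct with
  | case1 => intro e m h; simp [pvBest] at h
  | case2 c t rest hnone ih =>
    intro e m h
    have hr : rest = (c :: t).filter (fun x => x != c) := rfl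
    rw [hr] at hnone
    have hnil := (pvBest_none _).1 hnone
    rw [pvBest, hnone] at h
    have h' : some ((c, ((c :: t).length : Int) - (((c :: t).filter (fun x => x != c)).length : Int)) : Char × Int) = some (e, m) := h
    obtain ⟨he, hm⟩ : c = e ∧ ((c :: t).length : Int) - (((c :: t).filter (fun x => x != c)).length : Int) = m := by
      simpa using h'
    subst he
    have hall : ∀ d ∈ c :: t, d = c := by
      intro d hd
      by_contra hne
      have hdm := pv_mem_rest hd hne
      rw [hnil] at hdm
      exact absurd hdm List.not_mem_nil
    have hlen := pv_len_split c (c :: t)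
    rw [hnil] at hlen hm
    refine ⟨?_, List.mem_cons_self, ?_, ?_⟩
    · simp at hlen hm ⊢; omega
    · intro d hd; rw [hall d hd]
    · intro d hd _; simp
  | case3 c t rest k b hsome hle ih =>
    intro e m h
    have hr : rest = (c :: t).filter (fun x => x != c) := rfl
    have hk : k = ((c :: t).length : Int) - (((c :: t).filter (fun x => x != c)).length : Int) := rfl
    rw [hr] at hsome
    rw [hk] at hle
    rw [pvBest, hsome] at h
    have h' : (if b.2 ≤ ((c :: t).length : Int) - (((c :: t).filter (fun x => x != c)).length : Int)
        then some ((c, ((c :: t).length : Int) - (((c :: t).filter (fun x => x != c)).length : Int)) : Char × Int)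
        else some b) = some (e, m) := h
    rw [if_pos hle] at h'
    obtain ⟨he, hm⟩ : c = e ∧ ((c :: t).length : Int) - (((c :: t).filter (fun x => x != c)).length : Int) = m := by
      simpa using h'
    subst he
    have hlen := pv_len_split c (c :: t)
    have hkc : ((c :: t).length : Int) - (((c :: t).filter (fun x => x != c)).length : Int)
        = ((c :: t).count c : Int) := by omega
    have ihb := ih b.1 b.2 (by rw [hr]; exact hsome)
    rw [hr] at ihb
    obtain ⟨hbm, hbmem, hble, _⟩ := And.intro ihb.1 ihb.2
    refine ⟨by omega, List.mem_cons_self, ?_, ?_⟩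
    · intro d hd
      by_cases hne : d = c
      · rw [hne]
      · have hdr := pv_mem_rest hd hne
        have h1 := hble d hdr
        have h2 := pv_count_filter_ne c (c :: t) hne
        rw [hkc] at hle
        have h3 := pv_count_filter_ne c (c :: t) (show b.1 ≠ c from ?_)
        · rw [h2, h3] at h1
          omega
        · intro hbc
          have := (List.mem_filter.1 hbmem).2
          rw [hbc] at this
          simp at this
    · intro d hd _; simp
  | case4 c t rest k b hsome hgt ih =>
    intro e m h
    have hr : rest = (c :: t).filter (fun x => x != c) := rfl
    have hk : k = ((c :: t).length : Int) - (((c :: t).filter (fun x => x != c)).length : Int) := rfl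
    rw [hr] at hsome
    rw [hk] at hgt
    rw [pvBest, hsome] at h
    have h' : (if b.2 ≤ ((c :: t).length : Int) - (((c :: t).filter (fun x => x != c)).length : Int)
        then some ((c, ((c :: t).length : Int) - (((c :: t).filter (fun x => x != c)).length : Int)) : Char × Int)
        else some b) = some (e, m) := h
    rw [if_neg hgt] at h'
    obtain ⟨he, hm⟩ : b.1 = e ∧ b.2 = m := by
      have := Option.some_inj.1 h'
      exact ⟨congrArg Prod.fst this, congrArg Prod.snd this⟩
    have hlen := pv_len_split c (c :: t)
    have hkc : ((c :: t).length : Int) - (((c :: t).filter (fun x => x != c)).length : Int)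
        = ((c :: t).count c : Int) := by omega
    rw [hkc] at hgt
    have ihb := ih b.1 b.2 (by rw [hr]; exact hsome)
    rw [hr] at ihb
    obtain ⟨hbm, hbmem, hble, hbtie⟩ := And.intro ihb.1 ihb.2
    have hec : b.1 ≠ c := by
      intro hbc
      have := (List.mem_filter.1 hbmem).2
      rw [hbc] at this
      simp at this
    have hmem : b.1 ∈ c :: t := (List.mem_filter.1 hbmem).1
    have hcnt := pv_count_filter_ne c (c :: t) hec
    subst he hm
    refine ⟨by rw [hbm, hcnt], hmem, ?_, ?_⟩
    · intro d hd
      by_cases hne : d = c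
      · subst hne
        rw [hbm, hcnt] at hgt
        omega
      · have hdr := pv_mem_rest hd hne
        have h1 := hble d hdr
        have h2 := pv_count_filter_ne c (c :: t) hne
        rw [hcnt] at h1
        rw [h2] at h1
        exact h1
    · intro d hd htie
      by_cases hne : d = c
      · subst hne
        rw [hbm, hcnt] at hgt
        omega
      · have hdr := pv_mem_rest hd hne
        have h2 := pv_count_filter_ne c (c :: t) hne
        have htier : ((c :: t).filter (fun x => x != c)).count d
            = ((c :: t).filter (fun x => x != c)).count b.1 := by
          rw [hcnt, h2, htie]
        exact pv_idxOf_filter_le (fun x => x != c) (c :: t) b.1 d hbmem hdr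
          (hbtie d hdr htier)

-- ===== per-word equality =====

theorem pv_step_eq : pvStepA = (fun out word =>
    if PySem.Str.len word % 2 == 1 then
      match pvBest (PySem.Str.lower word).toList with
      | some b => out ++ [b.1]
      | none => out
    else out) := by
  funext res word
  unfold pvStepA
  by_cases hodd : (PySem.Str.len word % 2 == 1) = true
  · rw [if_pos hodd, if_pos hodd]
    simp only [PySem.Str.toList_lower, gt_iff_lt]
    set wl := PySem.Chars.lower word.toList with hwl
    have hf : ∀ c, (wl.foldl (fun d c => d.insert c (d.getD c 0 + 1))
        (PySem.Dict.empty : PySem.Dict Char Int)).getD c 0 = (wl.count c : Int) := by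
      intro c
      rw [PySem.Dict.getD_foldl_insert_add_one, PySem.Dict.getD_empty]
      ring
    have hfun : (fun (p : Int × Option Char) c =>
        if p.1 < (wl.foldl (fun d c => d.insert c (d.getD c 0 + 1))
            (PySem.Dict.empty : PySem.Dict Char Int)).getD c 0
        then ((wl.foldl (fun d c => d.insert c (d.getD c 0 + 1))
            (PySem.Dict.empty : PySem.Dict Char Int)).getD c 0, some c) else p)
        = (fun (p : Int × Option Char) c =>
            if p.1 < (wl.count c : Int) then ((wl.count c : Int), some c) else p) := by
      funext p c; rw [hf c]
    rw [hfun, pv_scan_eq_max? (fun c => (wl.count c : Int)) wl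
        (fun c hc => by
          show (0 : Int) < (wl.count c : Int)
          exact_mod_cast List.count_pos_iff.2 hc)]
    have hne : wl ≠ [] := by
      intro h
      have hlen : ((word.toList.length : Int)) % 2 = 1 := by
        simpa [PySem.Str.len_eq] using hodd
      have hz : word.toList.length = 0 := by
        have : wl.length = 0 := by rw [h]; rfl
        simpa [hwl, PySem.Chars.lower] using this
      rw [hz] at hlen
      omega
    obtain ⟨a, hA⟩ : ∃ a, PySem.List.max? wl (fun c => (wl.count c : Int)) = some a := by
      cases hmax : PySem.List.max? wl (fun c => (wl.count c : Int)) with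
      | none => exact absurd ((PySem.List.max?_eq_none_iff _ _).1 hmax) hne
      | some a => exact ⟨a, rfl⟩
    obtain ⟨⟨b, mb⟩, hb⟩ : ∃ b, pvBest wl = some b := by
      cases hbb : pvBest wl with
      | none => exact absurd ((pvBest_none wl).1 hbb) hne
      | some b => exact ⟨b, rfl⟩
    rw [hA, hb]
    have hab : a = b := pvGood_unique (pv_max?_good wl a hA) (pvBest_good wl b mb hb).2
    rw [hab]
  · rw [if_neg hodd, if_neg hodd]

-- ===== VERDICT (by name: the statement is the Claim_ definition above) =====
theorem solution_spec : Claim_equal_solution := by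
  intro sentence _
  unfold Spec_solution solution solution_alt
  rw [pv_step_eq]
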